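-- pv_equiv track=rewrite | github.com/SwoosOfficial/molybdenum-beta | plot-beta.py | checkRowAbs
-- ===== SOURCE A (Python) =====
-- def checkRowAbs(string,nextPos,depth=0):
-- 	if nextPos-1-depth<0:
-- 		return 1;
-- 	elif string[nextPos-1-depth] in opList+braList and string[nextPos-1-depth]!="|":
-- 		return 1;
-- 	elif string[nextPos-1-depth] in opList+braList and string[nextPos-1-depth]=="|":
-- 		return checkRowAbs(string,nextPos,depth+1);
-- 	else:
-- 		return -1;
--
-- opList=["+","-","/","*","|","^","%","&","_"];
--
-- braList=["(","[","{","«","„",")","]","}","»","“"];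
-- ===== SOURCE B (Python) =====
-- _OPS_NO_BAR = set("+-/*^%&_" + "([{«„)]}»“")
--
-- def checkRowAbs(string, nextPos, depth=0):
--     i = nextPos - 1 - depth
--     while i >= 0 and string[i] == "|":
--         i -= 1
--     if i < 0:
--         return 1
--     return 1 if string[i] in _OPS_NO_BAR else -1
-- ===== Notes on version B (the rewrite author's own statement) =====
-- stated objective: simpler
-- what changed: Replaced the depth-counting tail recursion (which re-tests membership in opList+braList and the bar twice per step) with a backward bar-skipping index loop followed by one membership test against the operator/bracket set without '|'.
-- outside the precondition, e.g. on checkRowAbs('ab', 5, 0): A raises IndexError, B raises IndexError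
import Mathlib
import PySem

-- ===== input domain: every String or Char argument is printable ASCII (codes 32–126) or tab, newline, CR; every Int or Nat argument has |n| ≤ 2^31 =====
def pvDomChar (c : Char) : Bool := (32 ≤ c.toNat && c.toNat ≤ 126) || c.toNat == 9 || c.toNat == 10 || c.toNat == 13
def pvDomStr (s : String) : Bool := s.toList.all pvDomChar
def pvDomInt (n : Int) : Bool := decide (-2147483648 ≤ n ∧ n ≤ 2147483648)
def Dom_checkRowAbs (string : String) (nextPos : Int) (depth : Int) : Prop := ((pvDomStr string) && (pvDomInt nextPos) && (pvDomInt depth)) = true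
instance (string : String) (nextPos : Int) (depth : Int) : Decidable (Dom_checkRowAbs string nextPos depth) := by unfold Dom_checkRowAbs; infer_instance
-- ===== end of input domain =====

-- B replaces A's depth-counting tail recursion by a bar-skipping index loop plus one
-- membership test against the non-bar operator set (objective: simpler/idiomatic, same cost).

-- ===== PORT A =====
-- opList ++ braList, as A concatenates them at each test
def pvOpBraList : List Char :=
  ['+', '-', '/', '*', '|', '^', '%', '&', '_',
   '(', '[', '{', '«', '„', ')', ']', '}', '»', '“']

-- A's recursion: on an in-range index it inspects string[nextPos-1-depth]; out-of-range
-- (pyGet? = none) is Python's IndexError, excluded by Pre_; the port returns 0 there.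
def checkRowAbs (string : String) (nextPos : Int) (depth : Int) : Int :=
  if nextPos - 1 - depth < 0 then 1
  else
    match PySem.Str.pyGet? string (nextPos - 1 - depth) with
    | none => 0
    | some c =>
      if c ∈ pvOpBraList ∧ c ≠ '|' then 1
      else if c ∈ pvOpBraList ∧ c = '|' then checkRowAbs string nextPos (depth + 1)
      else -1
termination_by (nextPos - depth).toNat
decreasing_by omega

-- ===== PORT B =====
-- opList+braList minus '|' (Source B's _OPS_NO_BAR)
def pvOpsNoBar : List Char :=
  ['+', '-', '/', '*', '^', '%', '&', '_',
   '(', '[', '{', '«', '„', ')', ']', '}', '»', '“']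

-- Source B's `while i >= 0 and string[i] == "|": i -= 1` (out-of-range pyGet? = none stops the loop;
-- that input is Python's IndexError, excluded by Pre_)
def pvSkipBars (string : String) (i : Int) : Int :=
  if h : 0 ≤ i ∧ PySem.Str.pyGet? string i = some '|' then pvSkipBars string (i - 1)
  else i
termination_by (i + 1).toNat
decreasing_by obtain ⟨h1, -⟩ := h; omega

def checkRowAbs_alt (string : String) (nextPos : Int) (depth : Int) : Int :=
  let i := pvSkipBars string (nextPos - 1 - depth)
  if i < 0 then 1
  else
    match PySem.Str.pyGet? string i with
    | none => 0   -- Python B raises IndexError here; excluded by Pre_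
    | some c => if c ∈ pvOpsNoBar then 1 else -1

-- ===== PRECONDITION & SPEC =====
-- Pre_ excludes exactly the inputs where A (and B) raise IndexError: the first inspected
-- index nextPos-1-depth at or beyond the end of the string.
def Pre_checkRowAbs (string : String) (nextPos : Int) (depth : Int) : Prop :=
  nextPos - 1 - depth < (string.toList.length : Int)
instance (string : String) (nextPos : Int) (depth : Int) : Decidable (Pre_checkRowAbs string nextPos depth) := by unfold Pre_checkRowAbs; infer_instance

def pvWitness_checkRowAbs : String × Int × Int := ("a|+", 3, 0)

def Spec_checkRowAbs (string : String) (nextPos : Int) (depth : Int) (out : Int) : Prop := out = checkRowAbs_alt string nextPos depth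
instance (string : String) (nextPos : Int) (depth : Int) (out : Int) : Decidable (Spec_checkRowAbs string nextPos depth out) := by unfold Spec_checkRowAbs; infer_instance

-- ===== CLAIM (what is proved, stated in full; the proofs are below) =====
def Claim_equal_checkRowAbs : Prop := ∀ (string : String) (nextPos : Int) (depth : Int), Dom_checkRowAbs string nextPos depth → Pre_checkRowAbs string nextPos depth → Spec_checkRowAbs string nextPos depth (checkRowAbs string nextPos depth)

-- ===== LEMMAS AND PROOFS =====

theorem pvMem_noBar_iff (c : Char) : (c ∈ pvOpBraList ∧ c ≠ '|') ↔ c ∈ pvOpsNoBar := by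
  simp only [pvOpBraList, pvOpsNoBar, List.mem_cons, List.not_mem_nil, or_false]
  constructor
  · rintro ⟨h, hne⟩; tauto
  · intro h
    refine ⟨by tauto, ?_⟩
    rcases h with h|h|h|h|h|h|h|h|h|h|h|h|h|h|h|h|h|h <;> subst h <;> decide

theorem pvSkipBars_stop (string : String) (i : Int)
    (h : ¬ (0 ≤ i ∧ PySem.Str.pyGet? string i = some '|')) :
    pvSkipBars string i = i := by
  rw [pvSkipBars, dif_neg h]

theorem pvSkipBars_step (string : String) (i : Int)
    (h : 0 ≤ i ∧ PySem.Str.pyGet? string i = some '|') :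
    pvSkipBars string i = pvSkipBars string (i - 1) := by
  rw [pvSkipBars, dif_pos h]

theorem pvEq (string : String) (nextPos depth : Int) :
    checkRowAbs string nextPos depth = checkRowAbs_alt string nextPos depth := by
  rw [checkRowAbs]
  by_cases h : nextPos - 1 - depth < 0
  · simp only [h, dite_true]
    unfold checkRowAbs_alt
    rw [pvSkipBars_stop string (nextPos - 1 - depth) (by rintro ⟨h1, h2⟩; omega)]
    simp [h]
  · simp only [h, dite_false]
    cases hg : PySem.Str.pyGet? string (nextPos - 1 - depth) with
    | none =>
      unfold checkRowAbs_alt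
      rw [pvSkipBars_stop string (nextPos - 1 - depth) (by rintro ⟨h1, h2⟩; rw [hg] at h2; cases h2)]
      simp only [h, if_false]
      rw [hg]
    | some c =>
      by_cases hbar : c = '|'
      · subst hbar
        have hmem : ('|' : Char) ∈ pvOpBraList := by decide
        simp only [hmem, ne_eq, not_true_eq_false, and_false, if_false, and_true, if_true]
        rw [pvEq string nextPos (depth + 1)]
        unfold checkRowAbs_alt
        rw [pvSkipBars_step string (nextPos - 1 - depth) ⟨by omega, hg⟩]
        have he : nextPos - 1 - depth - 1 = nextPos - 1 - (depth + 1) := by ring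
        rw [he]
      · unfold checkRowAbs_alt
        rw [pvSkipBars_stop string (nextPos - 1 - depth) (by
          rintro ⟨h1, h2⟩; rw [hg] at h2; exact hbar (by injection h2))]
        simp only [h, if_false]
        rw [hg]
        by_cases hin : c ∈ pvOpBraList
        · have hc : c ∈ pvOpsNoBar := (pvMem_noBar_iff c).mp ⟨hin, hbar⟩
          simp [hin, hbar, hc]
        · have hc : c ∉ pvOpsNoBar := fun hc => hin ((pvMem_noBar_iff c).mpr hc).1
          simp [hin, hc]
termination_by (nextPos - depth).toNat
decreasing_by omega

-- ===== VERDICT (by name: the statement is the Claim_ definition above) =====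
theorem checkRowAbs_spec : Claim_equal_checkRowAbs := by
  intro string nextPos depth _ _
  exact pvEq string nextPos depth
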